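-- pv_equiv track=rewrite | github.com/dixitdevarshi/PaperMind | src/components/document_loader.py | _nearest_section
-- ===== SOURCE A (Python) =====
-- def _nearest_section(char_start: int, sections: dict[int, str]) -> str:
--     """Return the section heading at or before char_start."""
--     best = "Unknown"
--     for offset, heading in sorted(sections.items()):
--         if offset <= char_start:
--             best = heading
--         else:
--             break
--     return best
-- ===== SOURCE B (Python) =====
-- def _nearest_section(char_start: int, sections: dict[int, str]) -> str:
--     """Return the section heading at or before char_start (filter eligible, then max by offset; no sort)."""
--     eligible = [(o, h) for o, h in sections.items() if o <= char_start]
--     if not eligible: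
--         return "Unknown"
--     return max(eligible, key=lambda p: p[0])[1]
-- ===== Notes on version B (the rewrite author's own statement) =====
-- stated objective: faster
-- what changed: Replaced sort-then-scan-with-break by filtering the offsets <= char_start and taking the heading of the maximum eligible offset; Pre_ requires pairwise-distinct offsets, which always holds since the Python argument is a dict.
import Mathlib
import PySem

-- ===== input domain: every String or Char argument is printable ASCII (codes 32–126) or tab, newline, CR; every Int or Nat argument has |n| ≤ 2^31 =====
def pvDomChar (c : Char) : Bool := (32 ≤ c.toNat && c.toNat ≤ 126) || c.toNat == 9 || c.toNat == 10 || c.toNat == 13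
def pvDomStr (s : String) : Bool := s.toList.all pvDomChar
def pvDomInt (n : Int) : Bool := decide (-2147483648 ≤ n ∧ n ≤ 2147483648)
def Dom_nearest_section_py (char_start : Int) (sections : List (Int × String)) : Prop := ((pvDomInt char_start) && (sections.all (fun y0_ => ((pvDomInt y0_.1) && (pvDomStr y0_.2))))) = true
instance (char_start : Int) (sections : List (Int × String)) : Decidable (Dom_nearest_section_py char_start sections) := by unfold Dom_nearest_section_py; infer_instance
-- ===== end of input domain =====

-- B replaces A's sort-then-scan-with-break by filter-eligible + max-by-offset (faster, no sort).

-- ===== PORT A =====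
-- the 'for … if … else break' loop over the sorted items
def nearestGoA (char_start : Int) : List (Int × String) → String → String
  | [], best => best
  | (offset, heading) :: rest, best =>
      if offset ≤ char_start then nearestGoA char_start rest heading else best

-- sorted(sections.items()): dict items have pairwise-distinct keys (Pre_), so Python's
-- tuple sort coincides with the stable sort on the offset component.
def nearest_section_py (char_start : Int) (sections : List (Int × String)) : String :=
  nearestGoA char_start (PySem.List.sorted sections (fun p => p.1) false) "Unknown"

-- ===== PORT B =====
-- Source B: eligible = [(o,h) for o,h in items if o <= char_start]; empty → "Unknown"; else max(eligible, key=p[0])[1]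
def nearest_section_py_alt (char_start : Int) (sections : List (Int × String)) : String :=
  let eligible := sections.filter (fun p => decide (p.1 ≤ char_start))
  match PySem.List.max? eligible (fun p => p.1) with
  | none => "Unknown"
  | some p => p.2

-- ===== PRECONDITION & SPEC =====
-- Pre_ requires pairwise-distinct offsets: the Python argument is a dict[int, str], whose
-- keys are always distinct, so no representable Python input is excluded.
def Pre_nearest_section_py (char_start : Int) (sections : List (Int × String)) : Prop :=
  (sections.map Prod.fst).Nodup

instance (char_start : Int) (sections : List (Int × String)) : Decidable (Pre_nearest_section_py char_start sections) := by unfold Pre_nearest_section_py; infer_instance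

def pvWitness_nearest_section_py : Int × (List (Int × String)) := (5, [(0, "Intro"), (10, "Body")])

def Spec_nearest_section_py (char_start : Int) (sections : List (Int × String)) (out : String) : Prop := out = nearest_section_py_alt char_start sections
instance (char_start : Int) (sections : List (Int × String)) (out : String) : Decidable (Spec_nearest_section_py char_start sections out) := by unfold Spec_nearest_section_py; infer_instance

-- ===== CLAIM (what is proved, stated in full; the proofs are below) =====
def Claim_equal_nearest_section_py : Prop := ∀ (char_start : Int) (sections : List (Int × String)), Dom_nearest_section_py char_start sections → Pre_nearest_section_py char_start sections → Spec_nearest_section_py char_start sections (nearest_section_py char_start sections)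

-- ===== LEMMAS AND PROOFS =====

-- A's loop on any list with no eligible element returns the accumulator.
theorem goA_none (c : Int) (l : List (Int × String)) (best : String)
    (h : ∀ p ∈ l, ¬ p.1 ≤ c) :
    nearestGoA c l best = best := by
  cases l with
  | nil => rfl
  | cons p rest =>
      obtain ⟨o, hd⟩ := p
      have := h (o, hd) (by simp)
      simp only [nearestGoA, if_neg this]

-- A's loop on the sorted list returns the heading of the unique maximal eligible offset.
theorem goA_found (c : Int) (l : List (Int × String)) (best : String)
    (hs : l.Pairwise (fun a b => a.1 ≤ b.1))
    (hnd : (l.map Prod.fst).Nodup) (m : Int) (h : String)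
    (hmem : (m, h) ∈ l) (hmc : m ≤ c)
    (hmax : ∀ p ∈ l, p.1 ≤ c → p.1 ≤ m) :
    nearestGoA c l best = h := by
  induction l generalizing best with
  | nil => simp at hmem
  | cons p rest ih =>
      obtain ⟨o, hd⟩ := p
      simp only [List.map_cons, List.nodup_cons] at hnd
      have hpair := List.pairwise_cons.mp hs
      have hoc : o ≤ c := by
        rcases List.mem_cons.mp hmem with h1 | h1
        · have : o = m := (Prod.ext_iff.mp h1.symm).1
          omega
        · have : o ≤ m := hpair.1 (m, h) h1
          omega
      simp only [nearestGoA, if_pos hoc]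
      by_cases heq : (o, hd) = (m, h)
      · have ho : o = m ∧ hd = h := by simpa [Prod.ext_iff] using heq
        obtain ⟨rfl, rfl⟩ := ho
        refine goA_none c rest hd ?_
        rintro ⟨q, g⟩ hq hqc
        have h1 : o ≤ q := hpair.1 (q, g) hq
        have h2 : q ≤ o := hmax (q, g) (List.mem_cons_of_mem _ hq) hqc
        have : q = o := le_antisymm h2 h1
        subst this
        exact hnd.1 (List.mem_map.mpr ⟨(q, g), hq, rfl⟩)
      · have hmem' : (m, h) ∈ rest := by
          rcases List.mem_cons.mp hmem with h1 | h1
          · exact absurd h1.symm heq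
          · exact h1
        exact ih hd hpair.2 hnd.2 hmem' (fun q hq => hmax q (List.mem_cons_of_mem _ hq))

-- ===== VERDICT (by name: the statement is the Claim_ definition above) =====
theorem nearest_section_py_spec : Claim_equal_nearest_section_py := by
  intro c l _ hpre
  unfold Spec_nearest_section_py nearest_section_py nearest_section_py_alt
  have hperm : (PySem.List.sorted l (fun p => p.1) false).Perm l :=
    PySem.List.sorted_perm l (fun p => p.1) false
  have hndS : ((PySem.List.sorted l (fun p => p.1) false).map Prod.fst).Nodup :=
    (hperm.map Prod.fst).nodup_iff.mpr hpre
  have hpair : (PySem.List.sorted l (fun p => p.1) false).Pairwise (fun a b => a.1 ≤ b.1) :=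
    PySem.List.sorted_pairwise l (fun p => p.1)
  cases hmq : PySem.List.max? (l.filter (fun p => decide (p.1 ≤ c))) (fun p => p.1) with
  | none =>
      -- no eligible element: A also returns "Unknown"
      have hnil : l.filter (fun p => decide (p.1 ≤ c)) = [] :=
        (PySem.List.max?_eq_none_iff _ _).mp hmq
      simp only [hmq]
      refine goA_none c _ _ ?_
      intro p hp hpc
      have hmemf : p ∈ l.filter (fun q => decide (q.1 ≤ c)) := by
        simp [List.mem_filter, hperm.mem_iff.mp hp, hpc]
      rw [hnil] at hmemf
      simp at hmemf
  | some p =>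
      obtain ⟨m, h⟩ := p
      have hmem0 := PySem.List.max?_mem hmq
      have hmax0 := PySem.List.max?_isMax hmq
      simp only [List.mem_filter, decide_eq_true_eq] at hmem0
      have hmax : ∀ q ∈ l, q.1 ≤ c → q.1 ≤ m := by
        intro q hq hqc
        exact hmax0 q (by simp [List.mem_filter, hq, hqc])
      simp only [hmq]
      exact goA_found c _ "Unknown" hpair hndS m h (hperm.mem_iff.mpr hmem0.1) hmem0.2
        (fun q hq => hmax q (hperm.mem_iff.mp hq))
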